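-- pv_equiv track=rewrite | github.com/kiwwish/LW2 | src/alphabet.py | sub_txt
-- ===== SOURCE A (Python) =====
-- def str2vec(s: str) -> list[int]:
--     return [ord(c) for c in s.upper()]
--
-- def sym2num(sym_in: str) -> int:
--     tmp = str2vec(sym_in)
--
--     if tmp[0] != 95:  # 95 = '_'
--         result = tmp[0] - 1039
--         if tmp[0] > 1066:
--             result -= 1
--         return result
--     else:
--         return 0
--
-- def num2sym(num: int) -> str:
--     if num < 0 or num > 33:
--         print ("Введите номер от 0 до 31")
--     if num == 0:
--         return '_'
--     code = num + 1039
--     if num > 26:  # если номер больше 26 (т.е. Щ и дальше)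
--         code += 1  # компенсируем пропуск Ъ
--     return chr(code)
--
-- def sub_s(s1: str, s2: str) -> str:
--     tmp = sym2num(s1) - sym2num(s2) + 32
--     return num2sym(tmp % 32)
--
-- def sub_txt(T1: str, T2: str) -> str:
--     out = ""
--     m = min(len(T1), len(T2))
--     if len(T1) > len(T2):
--         T_IN = T1
--         flag = 0
--     else:
--         T_IN = T2
--         flag = 1
--     M = len(T_IN)
--
--     for i in range(m):
--         t1 = T1[i]
--         t2 = T2[i]
--         out += sub_s(t1, t2)
--
--     if M > m:
--         for i in range(m, M):
--             t = T_IN[i]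
--             if flag == 1:
--                 out += sub_s("_", t)
--             else:
--                 out += sub_s(t, "_")
--
--     return out
-- ===== SOURCE B (Python) =====
-- def str2vec(s: str) -> list[int]:
--     return [ord(c) for c in s.upper()]
--
-- def sym2num(sym_in: str) -> int:
--     tmp = str2vec(sym_in)
--
--     if tmp[0] != 95:  # 95 = '_'
--         result = tmp[0] - 1039
--         if tmp[0] > 1066:
--             result -= 1
--         return result
--     else:
--         return 0
--
-- def num2sym(num: int) -> str:
--     if num < 0 or num > 33:
--         print ("Введите номер от 0 до 31")
--     if num == 0:
--         return '_'
--     code = num + 1039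
--     if num > 26:
--         code += 1
--     return chr(code)
--
-- def sub_s(s1: str, s2: str) -> str:
--     tmp = sym2num(s1) - sym2num(s2) + 32
--     return num2sym(tmp % 32)
--
-- def sub_txt(T1: str, T2: str) -> str:
--     M = max(len(T1), len(T2))
--     P1 = T1 + '_' * (M - len(T1))
--     P2 = T2 + '_' * (M - len(T2))
--     return ''.join(sub_s(a, b) for a, b in zip(P1, P2))
-- ===== Notes on version B (the rewrite author's own statement) =====
-- stated objective: simpler
-- what changed: B pads the shorter string on the right with '_' (the zero symbol) and does one zip/join pass, removing A's min/max bookkeeping, the T_IN/flag selection and the separate tail loop.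
import Mathlib
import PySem

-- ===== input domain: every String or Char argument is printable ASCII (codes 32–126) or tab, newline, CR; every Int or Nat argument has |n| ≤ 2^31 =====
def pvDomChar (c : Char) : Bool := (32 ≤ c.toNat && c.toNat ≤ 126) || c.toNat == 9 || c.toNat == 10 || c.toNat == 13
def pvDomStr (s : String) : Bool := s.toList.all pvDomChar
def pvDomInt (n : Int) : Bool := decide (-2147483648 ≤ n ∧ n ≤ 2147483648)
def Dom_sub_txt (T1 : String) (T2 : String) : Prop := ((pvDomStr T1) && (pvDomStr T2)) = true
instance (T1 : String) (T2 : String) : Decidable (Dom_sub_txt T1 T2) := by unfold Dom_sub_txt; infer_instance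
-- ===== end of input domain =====

-- B pads the shorter string on the right with '_' and does a single zip pass, removing A's
-- min/max bookkeeping, the T_IN/flag selection and the separate tail loop; equal cost, simpler.

-- ===== PORT A =====
-- shared helpers (identical in both Python sources; single-char Python strings are List Char)

-- str2vec(s) = [ord(c) for c in s.upper()]
def pyStr2vec (s : List Char) : List Int :=
  (PySem.Chars.upper s).map (fun c => (c.toNat : Int))

-- sym2num; only ever called on one-character strings, so tmp[0] always exists
-- (the [] case is unreachable within sub_txt)
def pySym2num (s : List Char) : Int :=
  let tmp := pyStr2vec s
  match tmp with
  | [] => 0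
  | t :: _ =>
    if t ≠ 95 then
      let result := t - 1039
      let result := if t > 1066 then result - 1 else result
      result
    else 0

-- num2sym; always called with 0 ≤ num ≤ 31, returns a one-character string (the print is a side effect only)
def pyNum2sym (num : Int) : Char :=
  if num = 0 then '_'
  else
    let code := num + 1039
    let code := if num > 26 then code + 1 else code
    Char.ofNat code.toNat

def pySubS (s1 s2 : List Char) : Char :=
  let tmp := pySym2num s1 - pySym2num s2 + 32
  pyNum2sym (PySem.Int.mod tmp 32)

def sub_txt (T1 : String) (T2 : String) : String :=
  let L1 := T1.toList
  let L2 := T2.toList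
  let m := min L1.length L2.length
  let TINflag := if L1.length > L2.length then (L1, 0) else (L2, 1)
  let TIN := TINflag.1
  let flag := TINflag.2
  let M := TIN.length
  let out : List Char :=
    (List.range m).foldl (fun out i => out ++ [pySubS [L1.getD i ' '] [L2.getD i ' ']]) []
  let out :=
    if M > m then
      (List.range' m (M - m)).foldl
        (fun out i =>
          out ++ [if flag = 1 then pySubS ['_'] [TIN.getD i ' ']
                  else pySubS [TIN.getD i ' '] ['_']]) out
    else out
  String.ofList out

-- ===== PORT B =====
def sub_txt_alt (T1 : String) (T2 : String) : String :=
  let L1 := T1.toList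
  let L2 := T2.toList
  let M := max L1.length L2.length
  let P1 := L1 ++ List.replicate (M - L1.length) '_'
  let P2 := L2 ++ List.replicate (M - L2.length) '_'
  String.ofList ((P1.zip P2).map (fun p => pySubS [p.1] [p.2]))

-- ===== PRECONDITION & SPEC =====
def Spec_sub_txt (T1 : String) (T2 : String) (out : String) : Prop := out = sub_txt_alt T1 T2
instance (T1 : String) (T2 : String) (out : String) : Decidable (Spec_sub_txt T1 T2 out) := by unfold Spec_sub_txt; infer_instance

-- ===== CLAIM (what is proved, stated in full; the proofs are below) =====
def Claim_equal_sub_txt : Prop := ∀ (T1 : String) (T2 : String), Dom_sub_txt T1 T2 → Spec_sub_txt T1 T2 (sub_txt T1 T2)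

-- ===== LEMMAS AND PROOFS =====

-- core equality: A's two-loop construction equals B's pad-and-zip construction
theorem sub_core_eq (T1 T2 : String) : sub_txt T1 T2 = sub_txt_alt T1 T2 := by
  unfold sub_txt sub_txt_alt
  generalize T1.toList = L1
  generalize T2.toList = L2
  by_cases h : L1.length > L2.length
  · have hm : min L1.length L2.length = L2.length := by omega
    have hM : max L1.length L2.length = L1.length := by omega
    simp only [h, if_pos, PySem.List.foldl_append_singleton_eq_map, List.nil_append, hm, hM,
      Nat.sub_self, List.replicate_zero, List.append_nil]
    congr 1
    apply List.ext_getElem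
    · simp; omega
    · intro i hi₁ hi₂
      have hi : i < L1.length := by simp at hi₂; omega
      by_cases hil : i < L2.length
      · simp [hil, List.getElem_zip, hi]
      · simp [List.getElem_append, hil, List.getElem_zip, List.getD_eq_getElem, hi,
          List.getElem_range', Nat.add_sub_cancel' (Nat.le_of_not_lt hil)]
  · have hm : min L1.length L2.length = L1.length := by omega
    have hM : max L1.length L2.length = L2.length := by omega
    simp only [h, if_false, PySem.List.foldl_append_singleton_eq_map, List.nil_append, hm, hM,
      Nat.sub_self, List.replicate_zero, List.append_nil]
    by_cases he : L2.length > L1.length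
    · rw [if_pos he]
      congr 1
      apply List.ext_getElem
      · simp; omega
      · intro i hi₁ hi₂
        have hi : i < L2.length := by simp at hi₂; omega
        by_cases hil : i < L1.length
        · simp [hil, List.getElem_zip, hi]
        · simp [List.getElem_append, hil, List.getElem_zip, List.getD_eq_getElem, hi,
            List.getElem_range', Nat.add_sub_cancel' (Nat.le_of_not_lt hil)]
    · have heq : L1.length = L2.length := by omega
      rw [if_neg he]
      congr 1
      apply List.ext_getElem
      · simp; omega
      · intro i hi₁ hi₂
        have hi : i < L1.length := by simpa [heq] using hi₁
        simp [List.getElem_zip, hi, heq ▸ hi]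

-- ===== VERDICT (by name: the statement is the Claim_ definition above) =====
theorem sub_txt_spec : Claim_equal_sub_txt := by
  intro T1 T2 _
  exact sub_core_eq T1 T2
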